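-- pv_equiv track=rewrite | github.com/Coki628/kyopro_submissions | lib/strings.py | get_nxlist
-- ===== SOURCE A (Python) =====
-- def list2d(a, b, c): return [[c] * b for i in range(a)]
--
-- def get_nxlist(S):
--     N = len(S)
--     # nxt[i][c] := 位置i以降で最初に文字cが登場するindex(存在しないときはN)
--     nxt = list2d(N+1, 26, N)
--     for i in range(N-1, -1, -1):
--         for c in range(26):
--             nxt[i][c] = nxt[i+1][c]
--         nxt[i][S[i]] = i
--     return nxt
-- ===== SOURCE B (Python) =====
-- def get_nxlist(S):
--     N = len(S)
--     # index the occurrences of each character once, in one forward pass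
--     occ = [[] for _ in range(26)]
--     for i, s in enumerate(S):
--         occ[s].append(i)
--     # build each column by run-length expansion of its occurrence list
--     cols = []
--     for c in range(26):
--         col = []
--         start = 0
--         for p in occ[c]:
--             col += [p] * (p + 1 - start)
--             start = p + 1
--         col += [N] * (N + 1 - start)
--         cols.append(col)
--     # transpose columns into rows
--     return [list(row) for row in zip(*cols)]
-- ===== Notes on version B (the rewrite author's own statement) =====
-- stated objective: alternative
-- what changed: B replaces A's backward DP that copies each 26-entry row from the next row with a forward pass building a per-character occurrence index, run-length expansion of each occurrence list into one column, and a final transpose (zip) into rows.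
import Mathlib
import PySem

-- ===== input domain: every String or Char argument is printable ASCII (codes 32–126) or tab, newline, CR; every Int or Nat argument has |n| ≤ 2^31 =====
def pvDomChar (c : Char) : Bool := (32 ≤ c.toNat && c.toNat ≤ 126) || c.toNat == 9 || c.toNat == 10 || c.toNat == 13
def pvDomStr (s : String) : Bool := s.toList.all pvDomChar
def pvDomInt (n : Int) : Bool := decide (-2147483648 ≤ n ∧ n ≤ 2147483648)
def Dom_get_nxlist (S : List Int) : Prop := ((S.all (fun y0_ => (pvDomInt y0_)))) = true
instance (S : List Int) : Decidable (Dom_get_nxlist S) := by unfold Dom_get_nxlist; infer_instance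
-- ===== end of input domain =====

-- B builds the table by a different algorithm: a forward pass indexing each character's occurrence positions,
-- run-length expansion of each occurrence list into one column, and a transpose into rows — instead of A's
-- backward DP copying each 26-entry row from the next row (alternative decomposition, same asymptotic cost).


-- ===== PORT A =====
def list2d (a b c : Int) : List (List Int) :=
  (PySem.List.pyRange 0 a 1).map (fun _ => PySem.List.pyRepeat [c] b)

def get_nxlist (S : List Int) : List (List Int) :=
  let N : Int := PySem.List.len S
  let nxt : List (List Int) := list2d (N + 1) 26 N
  (PySem.List.pyRange (N - 1) (-1) (-1)).foldl (fun nxt i =>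
    let nxt := (PySem.List.pyRange 0 26 1).foldl (fun nxt c =>
      PySem.List.pySetD nxt i (PySem.List.pySetD (PySem.List.pyGetD nxt i [])
        c (PySem.List.pyGetD (PySem.List.pyGetD nxt (i + 1) []) c 0))) nxt
    PySem.List.pySetD nxt i (PySem.List.pySetD (PySem.List.pyGetD nxt i [])
      (PySem.List.pyGetD S i 0) i)) nxt

-- ===== PORT B =====
-- hand port of zip(*cols): stops as soon as some column is exhausted (exact for Python's zip)
def zipCols (cols : List (List Int)) : List (List Int) :=
  if h : cols ≠ [] ∧ ∀ col ∈ cols, col ≠ [] then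
    cols.map (fun col => col.headD 0) :: zipCols (cols.map List.tail)
  else []
termination_by (cols.headD []).length
decreasing_by
  rcases cols with _ | ⟨c, cs⟩
  · exact absurd rfl h.1
  · have hc : c ≠ [] := h.2 c (List.mem_cons_self)
    cases c with
    | nil => exact absurd rfl hc
    | cons a as => simp

def get_nxlist_alt (S : List Int) : List (List Int) :=
  let N : Int := PySem.List.len S
  let occ0 : List (List Int) := (PySem.List.pyRange 0 26 1).map (fun _ => ([] : List Int))
  let occ := (PySem.List.enumerate S).foldl
    (fun occ is => PySem.List.pySetD occ is.2 (PySem.List.pyGetD occ is.2 [] ++ [is.1])) occ0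
  let cols := (PySem.List.pyRange 0 26 1).foldl (fun cols c =>
    cols ++ [((PySem.List.pyGetD occ c []).foldl
        (fun (st : List Int × Int) p => (st.1 ++ PySem.List.pyRepeat [p] (p + 1 - st.2), p + 1))
        (([] : List Int), (0 : Int))).1
      ++ PySem.List.pyRepeat [N]
          (N + 1 - ((PySem.List.pyGetD occ c []).foldl
            (fun (st : List Int × Int) p => (st.1 ++ PySem.List.pyRepeat [p] (p + 1 - st.2), p + 1))
            (([] : List Int), (0 : Int))).2)]) []
  zipCols cols

-- ===== PRECONDITION & SPEC =====
-- Pre_ excludes exactly the lists containing an element ≥ 26 or < -26, on which A (and B alike) raises IndexError.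
def Pre_get_nxlist (S : List Int) : Prop := ∀ s ∈ S, -26 ≤ s ∧ s < 26
instance (S : List Int) : Decidable (Pre_get_nxlist S) := by unfold Pre_get_nxlist; infer_instance
def pvWitness_get_nxlist : List Int := [0, 25, 3, 0]

def Spec_get_nxlist (S : List Int) (out : List (List Int)) : Prop := out = get_nxlist_alt S
instance (S : List Int) (out : List (List Int)) : Decidable (Spec_get_nxlist S out) := by unfold Spec_get_nxlist; infer_instance

-- ===== CLAIM (what is proved, stated in full; the proofs are below) =====
def Claim_equal_get_nxlist : Prop := ∀ (S : List Int), Dom_get_nxlist S → Pre_get_nxlist S → Spec_get_nxlist S (get_nxlist S)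

-- ===== LEMMAS AND PROOFS =====

-- next occurrence of character c at or after position i (N if none): the common specification
def went (S : List Int) (i c : Nat) : Int :=
  if h : i < S.length then
    (if (if S[i] < 0 then S[i] + 26 else S[i]) = (c : Int) then (i : Int) else went S (i + 1) c)
  else (S.length : Int)
termination_by S.length - i

lemma went_stop (S : List Int) (c : Nat) : went S S.length c = (S.length : Int) := by
  unfold went; simp

def tblA (S : List Int) : List (List Int) :=
  (List.range (S.length + 1)).map (fun i => (List.range 26).map (fun c => went S i c))

-- ---------- A-side ----------
lemma row_step (r t : List Int) (m : Nat) (hr : r.length = 26) (ht : t.length = 26) (hm : m < 26) :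
    ((r.set m (t.getD m 0)).take (m + 1)) ++ t.drop (m + 1) = r.take m ++ t.drop m := by
  have hmt : m < t.length := by omega
  have hd : t.getD m 0 = t[m] := by
    simp [List.getD_eq_getElem?_getD, List.getElem?_eq_getElem hmt]
  rw [hd, List.take_succ, List.drop_eq_getElem_cons hmt]
  have h1 : (r.set m t[m]).take m = r.take m := List.take_set_of_le (le_refl m)
  have h2 : (r.set m t[m])[m]? = some t[m] := by
    rw [List.getElem?_set_self (by omega)]
  rw [h1, h2]
  simp

def mixA (S : List Int) (k : Nat) : List (List Int) :=
  (List.range (S.length + 1)).map (fun j =>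
    if k ≤ j then (List.range 26).map (fun c => went S j c) else List.replicate 26 (S.length : Int))

lemma row_update (S : List Int) (k : Nat) (hk : k < S.length)
    (h1 : -26 ≤ S[k]) (h2 : S[k] < 26) :
    ((List.range 26).map (fun c => went S (k + 1) c)).set
      (if S[k] < 0 then S[k] + 26 else S[k]).toNat (k : Int)
    = (List.range 26).map (fun c => went S k c) := by
  set w : Nat := (if S[k] < 0 then S[k] + 26 else S[k]).toNat with hw
  have hwv : (w : Int) = (if S[k] < 0 then S[k] + 26 else S[k]) := by
    rw [hw]; split_ifs with h <;> omega
  apply List.ext_getElem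
  · simp
  · intro j hj hj'
    simp only [List.length_set, List.length_map, List.length_range] at hj
    rw [List.getElem_set]
    simp only [List.getElem_map, List.getElem_range]
    conv_rhs => rw [went]
    rw [dif_pos hk]
    by_cases hjw : w = j
    · subst hjw
      rw [if_pos rfl, if_pos (by rw [hwv])]
    · rw [if_neg hjw, if_neg (by rw [← hwv]; intro hh; exact hjw (by exact_mod_cast hh))]

lemma mixA_set (S : List Int) (k : Nat) (hk : k < S.length) :
    (mixA S (k + 1)).set k ((List.range 26).map (fun c => went S k c)) = mixA S k := by
  apply List.ext_getElem
  · simp [mixA]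
  · intro j hj hj'
    simp only [mixA, List.length_set, List.length_map, List.length_range] at hj ⊢
    rw [List.getElem_set]
    by_cases hjk : k = j
    · subst hjk
      rw [if_pos rfl]
      simp only [List.getElem_map, List.getElem_range]
      rw [if_pos (le_refl k)]
    · rw [if_neg hjk]
      simp only [List.getElem_map, List.getElem_range]
      by_cases h : k ≤ j
      · rw [if_pos (by omega), if_pos h]
      · rw [if_neg (by omega), if_neg h]

lemma copyfold (k : Nat) : ∀ (n m : Nat) (T : List (List Int)), m + n = 26 →
    k + 1 < T.length → (T.getD k []).length = 26 → (T.getD (k + 1) []).length = 26 →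
    (PySem.List.pyRange (m : Int) 26 1).foldl
      (fun t c => PySem.List.pySetD t (k : Int) (PySem.List.pySetD (PySem.List.pyGetD t (k : Int) [])
        c (PySem.List.pyGetD (PySem.List.pyGetD t ((k : Int) + 1) []) c 0))) T
    = T.set k ((T.getD k []).take m ++ (T.getD (k + 1) []).drop m) := by
  intro n
  induction n with
  | zero =>
    intro m T hm hk hlk hlk1
    have : m = 26 := by omega
    subst this
    rw [PySem.List.pyRange_one_eq_nil (by norm_num)]
    simp only [List.foldl_nil]
    rw [List.take_of_length_le (by omega), List.drop_of_length_le (by omega)]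
    rw [List.append_nil]
    have hgd : T.getD k [] = T[k]'(by omega) := by
      simp [List.getD_eq_getElem?_getD, List.getElem?_eq_getElem (show k < T.length by omega)]
    rw [hgd, List.set_getElem_self]
  | succ n ih =>
    intro m T hm hk hlk hlk1
    have hm26 : m < 26 := by omega
    rw [PySem.List.pyRange_one_cons (by exact_mod_cast hm26)]
    rw [List.foldl_cons]
    set v : Int := (T.getD (k + 1) []).getD m 0 with hv
    set T1 : List (List Int) := T.set k ((T.getD k []).set m v) with hT1
    have hkT : k < T.length := by omega
    have hstep : PySem.List.pySetD T (k : Int) (PySem.List.pySetD (PySem.List.pyGetD T (k : Int) [])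
        ((m : Int)) (PySem.List.pyGetD (PySem.List.pyGetD T ((k : Int) + 1) []) ((m : Int)) 0)) = T1 := by
      rw [hT1, hv]
      rw [show ((k : Int) + 1) = ((k + 1 : Nat) : Int) by push_cast; ring]
      simp only [PySem.List.pySetD_natCast, PySem.List.pyGetD_natCast]
    rw [hstep]
    rw [show ((m : Int) + 1) = ((m + 1 : Nat) : Int) by push_cast; ring]
    have e1 : T1.getD k [] = (T.getD k []).set m v := by
      rw [hT1]
      simp [List.getD_eq_getElem?_getD, List.getElem?_set_self hkT]
    have e2 : T1.getD (k + 1) [] = T.getD (k + 1) [] := by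
      rw [hT1]
      simp [List.getD_eq_getElem?_getD, List.getElem?_set_ne (by omega : k ≠ k + 1)]
    rw [ih (m + 1) T1 (by omega) (by rw [hT1]; simpa using hk)
        (by rw [e1]; simpa using hlk) (by rw [e2]; exact hlk1)]
    rw [e1, e2, hT1, List.set_set]
    congr 1
    rw [hv]
    exact row_step _ _ m hlk hlk1 hm26

-- Python's negative-index wraparound for a length-26 list, for set and get
lemma pySetD_wrap (r : List Int) (s v : Int) (hr : r.length = 26) (h1 : -26 ≤ s) (h2 : s < 26) :
    PySem.List.pySetD r s v = r.set (if s < 0 then s + 26 else s).toNat v := by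
  rcases lt_or_ge s 0 with h | h
  · rw [if_pos h]
    simp only [PySem.List.pySetD, PySem.List.pySet?, PySem.List.pyIdx?, hr]
    rw [if_neg (by omega : ¬ 0 ≤ s)]
    split_ifs with hh
    · simp only [Option.map_some, Option.getD_some]
      congr 1
      omega
    · exfalso; push_cast at hh; omega
  · rw [if_neg (not_lt.mpr h)]
    exact PySem.List.pySetD_of_nonneg r v h

lemma mixA_length (S : List Int) (k : Nat) : (mixA S k).length = S.length + 1 := by
  simp [mixA]

lemma mixA_getD (S : List Int) (k j : Nat) (hj : j < S.length + 1) :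
    (mixA S k).getD j [] =
      if k ≤ j then (List.range 26).map (fun c => went S j c) else List.replicate 26 (S.length : Int) := by
  simp [mixA, List.getD_eq_getElem?_getD, List.getElem?_map, List.getElem?_range, hj]

lemma loopA (S : List Int) (hP : ∀ s ∈ S, -26 ≤ s ∧ s < 26) :
    ∀ (m k : Nat), k + m = S.length →
    (PySem.List.pyRange (k : Int) (S.length : Int) 1).foldr
      (fun i nxt =>
        PySem.List.pySetD
          ((PySem.List.pyRange 0 26 1).foldl (fun nxt c =>
            PySem.List.pySetD nxt i (PySem.List.pySetD (PySem.List.pyGetD nxt i [])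
              c (PySem.List.pyGetD (PySem.List.pyGetD nxt (i + 1) []) c 0))) nxt) i
          (PySem.List.pySetD
            (PySem.List.pyGetD
              ((PySem.List.pyRange 0 26 1).foldl (fun nxt c =>
                PySem.List.pySetD nxt i (PySem.List.pySetD (PySem.List.pyGetD nxt i [])
                  c (PySem.List.pyGetD (PySem.List.pyGetD nxt (i + 1) []) c 0))) nxt) i [])
            (PySem.List.pyGetD S i 0) i))
      (mixA S S.length)
    = mixA S k := by
  intro m
  induction m with
  | zero =>
    intro k hk
    have : k = S.length := by omega
    subst this
    rw [PySem.List.pyRange_one_eq_nil (le_refl _)]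
    rfl
  | succ m ih =>
    intro k hk
    have hkS : k < S.length := by omega
    rw [PySem.List.pyRange_one_cons (a := (k : Int)) (b := (S.length : Int)) (by exact_mod_cast hkS)]
    rw [List.foldr_cons]
    have ih' := ih (k + 1) (by omega)
    rw [show ((k + 1 : Nat) : Int) = ((k : Int) + 1) by push_cast; ring] at ih'
    rw [ih']
    have hrowk : (mixA S (k + 1)).getD k [] = List.replicate 26 (S.length : Int) := by
      rw [mixA_getD S (k + 1) k (by omega), if_neg (by omega)]
    have hrowk1 : (mixA S (k + 1)).getD (k + 1) [] = (List.range 26).map (fun c => went S (k + 1) c) := by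
      rw [mixA_getD S (k + 1) (k + 1) (by omega), if_pos (le_refl _)]
    have hcf := copyfold k 26 0 (mixA S (k + 1)) (by omega)
      (by rw [mixA_length]; omega) (by rw [hrowk]; simp) (by rw [hrowk1]; simp)
    rw [show ((0 : Nat) : Int) = 0 by norm_num] at hcf
    rw [hcf]
    rw [hrowk1]
    simp only [List.take_zero, List.drop_zero, List.nil_append]
    set row : List Int := (List.range 26).map (fun c => went S (k + 1) c) with hrow
    have hgd : PySem.List.pyGetD ((mixA S (k + 1)).set k row) (k : Int) [] = row := by
      rw [PySem.List.pyGetD_natCast]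
      simp [List.getD_eq_getElem?_getD, List.getElem?_set_self (by rw [mixA_length]; omega : k < (mixA S (k+1)).length)]
    rw [hgd]
    have hSk : PySem.List.pyGetD S (k : Int) 0 = S[k] := by
      rw [PySem.List.pyGetD_natCast]
      simp [List.getD_eq_getElem?_getD, List.getElem?_eq_getElem hkS]
    rw [hSk]
    rcases hP S[k] (List.getElem_mem hkS) with ⟨hb1, hb2⟩
    rw [pySetD_wrap row S[k] (k : Int) (by rw [hrow]; simp) hb1 hb2]
    rw [hrow, row_update S k hkS hb1 hb2]
    rw [PySem.List.pySetD_natCast, List.set_set]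
    exact mixA_set S k hkS

lemma wentRow_stop (S : List Int) :
    (List.range 26).map (fun c => went S S.length c) = List.replicate 26 (S.length : Int) := by
  have hcongr : ∀ c ∈ List.range 26, went S S.length c = ((S.length : Int)) :=
    fun c _ => went_stop S c
  rw [List.map_congr_left hcongr, List.map_const', List.length_range]

lemma initA (S : List Int) :
    (PySem.List.pyRange 0 ((S.length : Int) + 1) 1).map (fun _ => PySem.List.pyRepeat [(S.length : Int)] 26)
      = mixA S S.length := by
  rw [show ((S.length : Int) + 1) = ((S.length + 1 : Nat) : Int) by push_cast; ring]
  rw [PySem.List.pyRange_zero_natCast, List.map_map]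
  unfold mixA
  apply List.map_congr_left
  intro j hj
  rw [List.mem_range] at hj
  simp only [Function.comp]
  rw [PySem.List.pyRepeat_singleton]
  rw [show Int.toNat 26 = 26 from rfl]
  by_cases h : S.length ≤ j
  · rw [if_pos h]
    have hjeq : j = S.length := by omega
    rw [hjeq, wentRow_stop]
  · rw [if_neg h]

lemma mixA_zero (S : List Int) : mixA S 0 = tblA S := by
  unfold mixA tblA
  apply List.map_congr_left
  intro j _
  rw [if_pos (Nat.zero_le j)]

lemma A_eq (S : List Int) (hP : ∀ s ∈ S, -26 ≤ s ∧ s < 26) : get_nxlist S = tblA S := by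
  unfold get_nxlist list2d
  simp only [PySem.List.len_eq]
  rw [PySem.List.pyRange_neg_one_eq_reverse]
  rw [show ((-1 : Int) + 1) = 0 by norm_num]
  rw [show ((S.length : Int) - 1 + 1) = (S.length : Int) by ring]
  rw [List.foldl_reverse]
  rw [initA]
  have h := loopA S hP S.length 0 (by omega)
  rw [show ((0 : Nat) : Int) = 0 by norm_num] at h
  rw [← mixA_zero]
  exact h

-- ---------- B-side ----------
-- which length-26 slot Python's (possibly negative) index s addresses
def wvN (s : Int) : Nat := (if s < 0 then s + 26 else s).toNat

lemma pyGetD_wrap {α : Type} (r : List α) (s : Int) (d : α) (hr : r.length = 26)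
    (h1 : -26 ≤ s) (h2 : s < 26) : PySem.List.pyGetD r s d = r.getD (wvN s) d := by
  rcases lt_or_ge s 0 with h | h
  · have hk0 : 0 < (-s).toNat := by omega
    have hkle : (-s).toNat ≤ r.length := by omega
    have hthis := PySem.List.pyGetD_neg_natCast r (-s).toNat d hk0 hkle
    rw [show (-(((-s).toNat : Nat) : Int)) = s by omega] at hthis
    rw [hthis]
    have hbn : wvN s < r.length := by unfold wvN; split_ifs <;> omega
    rw [List.getD_eq_getElem?_getD, List.getElem?_eq_getElem hbn]
    simp only [Option.getD_some]
    congr 1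
    unfold wvN; split_ifs <;> omega
  · have hb : s < (r.length : Int) := by omega
    rw [PySem.List.pyGetD_eq_getElem r d h hb]
    have hbn : wvN s < r.length := by unfold wvN; split_ifs <;> omega
    rw [List.getD_eq_getElem?_getD, List.getElem?_eq_getElem hbn]
    simp only [Option.getD_some]
    congr 1
    unfold wvN; split_ifs <;> omega

lemma pySetD_wrapG {α : Type} (r : List α) (s : Int) (v : α) (hr : r.length = 26)
    (h1 : -26 ≤ s) (h2 : s < 26) : PySem.List.pySetD r s v = r.set (wvN s) v := by
  unfold wvN
  rcases lt_or_ge s 0 with h | h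
  · rw [if_pos h]
    simp only [PySem.List.pySetD, PySem.List.pySet?, PySem.List.pyIdx?, hr]
    rw [if_neg (by omega : ¬ 0 ≤ s)]
    split_ifs with hh
    · simp only [Option.map_some, Option.getD_some]
      congr 1
      omega
    · exfalso; push_cast at hh; omega
  · rw [if_neg (not_lt.mpr h)]
    exact PySem.List.pySetD_of_nonneg r v h

-- occurrence test at position i for character c
def hitB (S : List Int) (c i : Nat) : Bool := wvN (S.getD i 0) == c

-- positions ≥ start at which character c occurs
def occFrom (S : List Int) (c start : Nat) : List Nat :=
  (List.range' start (S.length - start)).filter (hitB S c)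

-- run-length expansion of an occurrence list into a column, pure form of B's inner fold
def fullCol (N : Int) : List Int → Int → List Int
  | [], st => List.replicate (N + 1 - st).toNat N
  | p :: L, st => List.replicate (p + 1 - st).toNat p ++ fullCol N L (p + 1)

lemma fold_fullCol (N : Int) : ∀ (L : List Int) (acc : List Int) (st : Int),
    (L.foldl (fun (s : List Int × Int) p => (s.1 ++ PySem.List.pyRepeat [p] (p + 1 - s.2), p + 1)) (acc, st)).1
      ++ PySem.List.pyRepeat [N]
          (N + 1 - (L.foldl (fun (s : List Int × Int) p => (s.1 ++ PySem.List.pyRepeat [p] (p + 1 - s.2), p + 1)) (acc, st)).2)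
    = acc ++ fullCol N L st := by
  intro L
  induction L with
  | nil =>
    intro acc st
    simp [fullCol, PySem.List.pyRepeat_singleton]
  | cons p L ih =>
    intro acc st
    rw [List.foldl_cons]
    rw [ih (acc ++ PySem.List.pyRepeat [p] (p + 1 - st)) (p + 1)]
    rw [fullCol, PySem.List.pyRepeat_singleton, List.append_assoc]

lemma occFrom_mem_ge (S : List Int) (c start : Nat) : ∀ i ∈ occFrom S c start, start ≤ i := by
  intro i hi
  unfold occFrom at hi
  have := List.mem_range'_1.mp (List.mem_of_mem_filter hi)
  omega

lemma occFrom_step (S : List Int) (c start : Nat) (h : start < S.length) :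
    occFrom S c start = if hitB S c start then start :: occFrom S c (start + 1) else occFrom S c (start + 1) := by
  unfold occFrom
  rw [show S.length - start = (S.length - (start + 1)) + 1 by omega, List.range'_succ, List.filter_cons]

lemma headD_map_range (f : Nat → Int) (n : Nat) (h : 0 < n) (d : Int) :
    ((List.range n).map f).headD d = f 0 := by
  cases n with
  | zero => omega
  | succ m => rw [List.range_succ_eq_map]; simp

lemma fullCol_shift (N : Int) (L : List Int) (st : Int) (hst : st < N)
    (hL : ∀ p ∈ L, st + 1 ≤ p) :
    fullCol N L st = (fullCol N L (st + 1)).headD N :: fullCol N L (st + 1) := by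
  cases L with
  | nil =>
    simp only [fullCol]
    rw [show (N + 1 - st).toNat = (N + 1 - (st + 1)).toNat + 1 by omega]
    rw [List.replicate_succ]
    congr 1
    rw [show (N + 1 - (st + 1)).toNat = (N - st).toNat by omega]
    have : 0 < (N - st).toNat := by omega
    cases hh : (N - st).toNat with
    | zero => omega
    | succ m => simp [List.replicate_succ]
  | cons p L' =>
    have hp : st + 1 ≤ p := hL p List.mem_cons_self
    simp only [fullCol]
    rw [show (p + 1 - st).toNat = (p + 1 - (st + 1)).toNat + 1 by omega]
    rw [List.replicate_succ, List.cons_append]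
    congr 1
    have : 0 < (p + 1 - (st + 1)).toNat := by omega
    cases hh : (p + 1 - (st + 1)).toNat with
    | zero => omega
    | succ m => simp [List.replicate_succ]

-- bridge: hitB agrees with went's branch test (under the bounds of Pre_)
lemma hitB_iff (S : List Int) (c i : Nat) (hi : i < S.length) (hc : c < 26)
    (h1 : -26 ≤ S[i]) (h2 : S[i] < 26) :
    hitB S c i = true ↔ (if S[i] < 0 then S[i] + 26 else S[i]) = (c : Int) := by
  unfold hitB wvN
  have hg : S.getD i 0 = S[i] := by
    simp [List.getD_eq_getElem?_getD, List.getElem?_eq_getElem hi]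
  rw [hg, beq_iff_eq]
  split_ifs with h <;> omega

lemma full_occ (S : List Int) (c : Nat) (hc : c < 26) (hP : ∀ s ∈ S, -26 ≤ s ∧ s < 26) :
    ∀ (m start : Nat), start + m = S.length →
    fullCol (S.length : Int) ((occFrom S c start).map (fun (i : Nat) => (i : Int))) (start : Int)
      = (List.range (S.length + 1 - start)).map (fun j => went S (start + j) c) := by
  intro m
  induction m with
  | zero =>
    intro start h
    have hst : start = S.length := by omega
    subst hst
    have hocc : occFrom S c S.length = [] := by
      unfold occFrom
      rw [Nat.sub_self, List.range'_zero, List.filter_nil]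
    rw [hocc, List.map_nil]
    simp only [fullCol]
    rw [show ((S.length : Int) + 1 - (S.length : Int)).toNat = 1 by omega]
    rw [show S.length + 1 - S.length = 1 by omega]
    simp [went_stop]
  | succ m ih =>
    intro start h
    have hsl : start < S.length := by omega
    have ih' := ih (start + 1) (by omega)
    rcases hP S[start] (List.getElem_mem hsl) with ⟨hb1, hb2⟩
    -- RHS decomposition
    have hrhs : (List.range (S.length + 1 - start)).map (fun j => went S (start + j) c)
        = went S start c :: (List.range (S.length + 1 - (start + 1))).map (fun j => went S (start + 1 + j) c) := by
      rw [show S.length + 1 - start = (S.length + 1 - (start + 1)) + 1 by omega]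
      rw [List.range_succ_eq_map, List.map_cons, List.map_map]
      congr 1
      apply List.map_congr_left
      intro j _
      show went S (start + (j + 1)) c = went S (start + 1 + j) c
      rw [show start + (j + 1) = start + 1 + j by omega]
    rw [hrhs, occFrom_step S c start hsl]
    by_cases hh : hitB S c start
    · rw [if_pos hh, List.map_cons]
      simp only [fullCol]
      rw [show ((start : Int) + 1 - (start : Int)).toNat = 1 by omega]
      rw [show ((start : Int) + 1) = ((start + 1 : Nat) : Int) by push_cast; ring]
      rw [ih']
      simp only [List.replicate_one, List.singleton_append]
      congr 1
      rw [went]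
      rw [dif_pos hsl, if_pos ((hitB_iff S c start hsl hc hb1 hb2).mp hh)]
    · rw [if_neg hh]
      have hcond : ¬ ((if S[start] < 0 then S[start] + 26 else S[start]) = (c : Int)) := by
        rw [← hitB_iff S c start hsl hc hb1 hb2]; simpa using hh
      have hge : ∀ p ∈ (occFrom S c (start + 1)).map (fun (i : Nat) => (i : Int)), (start : Int) + 1 ≤ p := by
        intro p hp
        rw [List.mem_map] at hp
        obtain ⟨i, hi, rfl⟩ := hp
        have := occFrom_mem_ge S c (start + 1) i hi
        omega
      rw [fullCol_shift (S.length : Int) _ (start : Int) (by exact_mod_cast hsl) hge]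
      rw [show ((start : Int) + 1) = ((start + 1 : Nat) : Int) by push_cast; ring]
      rw [ih']
      congr 1
      rw [headD_map_range _ _ (by omega)]
      rw [show start + 1 + 0 = start + 1 by omega]
      conv_rhs => rw [went]
      rw [dif_pos hsl, if_neg hcond]

-- the occurrence index built by B's first loop
def occI (S : List Int) (c : Nat) : List Int :=
  ((List.range S.length).filter (hitB S c)).map (fun (i : Nat) => (i : Int))

lemma occ_fold (l : List (Int × Int)) :
    ∀ (occ : List (List Int)), occ.length = 26 → (∀ p ∈ l, -26 ≤ p.2 ∧ p.2 < 26) →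
    l.foldl (fun occ is => PySem.List.pySetD occ is.2 (PySem.List.pyGetD occ is.2 [] ++ [is.1])) occ
    = (List.range 26).map (fun c => occ.getD c [] ++ (l.filter (fun is => wvN is.2 == c)).map (fun is => is.1)) := by
  induction l with
  | nil =>
    intro occ hlen _
    simp only [List.foldl_nil, List.filter_nil, List.map_nil, List.append_nil]
    apply List.ext_getElem
    · simp [hlen]
    · intro j hj hj'
      simp only [List.getElem_map, List.getElem_range]
      rw [List.getD_eq_getElem?_getD, List.getElem?_eq_getElem (by omega : j < occ.length)]
      simp
  | cons is l ih =>
    intro occ hlen hb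
    rcases hb is List.mem_cons_self with ⟨h1, h2⟩
    rw [List.foldl_cons]
    rw [pyGetD_wrap occ is.2 [] hlen h1 h2, pySetD_wrapG occ is.2 _ hlen h1 h2]
    have hw : wvN is.2 < 26 := by unfold wvN; split_ifs with h <;> omega
    rw [ih _ (by rw [List.length_set]; exact hlen) (fun p hp => hb p (List.mem_cons_of_mem _ hp))]
    apply List.map_congr_left
    intro c hc
    rw [List.mem_range] at hc
    rw [List.filter_cons]
    by_cases hcw : wvN is.2 = c
    · subst hcw
      rw [if_pos (by simp)]
      rw [List.map_cons]
      rw [List.getD_eq_getElem?_getD, List.getElem?_set_self (by omega)]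
      rw [List.getD_eq_getElem?_getD]
      simp [List.append_assoc]
    · rw [if_neg (by simpa using hcw)]
      rw [List.getD_eq_getElem?_getD, List.getElem?_set_ne (by omega : wvN is.2 ≠ c),
        ← List.getD_eq_getElem?_getD]

lemma occ0_getD {β : Type} (L : List β) (c : Nat) :
    (L.map (fun _ => ([] : List Int))).getD c [] = [] := by
  rw [List.getD_eq_getElem?_getD, List.getElem?_map]
  cases L[c]? <;> simp

lemma enum_filter (S : List Int) (c : Nat) :
    ((PySem.List.enumerate S).filter (fun is => wvN is.2 == c)).map (fun is => is.1) = occI S c := by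
  rw [PySem.List.enumerate_eq_map_pyRange S (0 : Int)]
  rw [show PySem.List.len S = ((S.length : Nat) : Int) from PySem.List.len_eq S]
  rw [PySem.List.pyRange_zero_natCast, List.map_map, List.filter_map, List.map_map]
  unfold occI
  have hf : List.filter ((fun (is : Int × Int) => wvN is.2 == c) ∘ ((fun j => (j, PySem.List.pyGetD S j (0:Int))) ∘ (fun (k : Nat) => (k : Int)))) (List.range S.length)
      = List.filter (hitB S c) (List.range S.length) := by
    apply List.filter_congr
    intro k _
    simp only [Function.comp, PySem.List.pyGetD_natCast]
    rfl
  rw [hf]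
  apply List.map_congr_left
  intro k _
  simp only [Function.comp]

lemma zipCols_map {γ : Type} : ∀ (n : Nat) (cs : List γ) (f : γ → Nat → Int), cs ≠ [] →
    zipCols (cs.map (fun c => (List.range n).map (f c))) = (List.range n).map (fun j => cs.map (fun c => f c j)) := by
  intro n
  induction n with
  | zero =>
    intro cs f hcs
    rw [zipCols]
    rw [dif_neg]
    · simp
    · intro hcon
      rcases cs with _ | ⟨c, cs'⟩
      · exact hcs rfl
      · exact hcon.2 ((fun c => (List.range 0).map (f c)) c) (by simp) (by simp)
  | succ n ih =>
    intro cs f hcs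
    have hcond : (cs.map (fun c => (List.range (n+1)).map (f c))) ≠ [] ∧
        ∀ col ∈ cs.map (fun c => (List.range (n+1)).map (f c)), col ≠ [] := by
      constructor
      · simpa using hcs
      · intro col hcol
        rw [List.mem_map] at hcol
        obtain ⟨c, _, rfl⟩ := hcol
        rw [List.range_succ_eq_map]
        simp
    have hhead : (cs.map (fun c => (List.range (n+1)).map (f c))).map (fun col => col.headD 0)
        = cs.map (fun c => f c 0) := by
      rw [List.map_map]
      apply List.map_congr_left
      intro c _
      simp only [Function.comp]
      rw [List.range_succ_eq_map]
      simp
    have htail : (cs.map (fun c => (List.range (n+1)).map (f c))).map List.tail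
        = cs.map (fun c => (List.range n).map (fun j => f c (j + 1))) := by
      rw [List.map_map]
      apply List.map_congr_left
      intro c _
      simp only [Function.comp]
      rw [List.range_succ_eq_map]
      rw [List.map_cons, List.tail_cons, List.map_map]
      rfl
    rw [zipCols, dif_pos hcond, hhead, htail, ih cs (fun c j => f c (j + 1)) hcs]
    rw [List.range_succ_eq_map, List.map_cons, List.map_map]
    congr 1

lemma B_eq (S : List Int) (hP : ∀ s ∈ S, -26 ≤ s ∧ s < 26) : get_nxlist_alt S = tblA S := by
  unfold get_nxlist_alt
  simp only [PySem.List.len_eq]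
  rw [occ_fold (PySem.List.enumerate S) _ (by simp [PySem.List.length_pyRange_one]) ?hb]
  case hb =>
    intro p hp
    rw [PySem.List.mem_enumerate_iff] at hp
    obtain ⟨k, hk, rfl⟩ := hp
    exact hP _ (List.getElem_mem hk)
  rw [PySem.List.foldl_append_singleton_eq_map, List.nil_append]
  rw [show (26 : Int) = ((26 : Nat) : Int) from rfl, PySem.List.pyRange_zero_natCast, List.map_map]
  have key := zipCols_map (S.length + 1) (List.range 26) (fun c j => went S j c) (by decide)
  refine Eq.trans (congrArg zipCols (List.map_congr_left ?_)) (key.trans rfl)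
  intro c hc
  rw [List.mem_range] at hc
  simp only [Function.comp]
  rw [PySem.List.pyGetD_natCast, PySem.List.getD_map_range _ 26 c _ hc]
  rw [occ0_getD, List.nil_append, enum_filter]
  rw [fold_fullCol (S.length : Int) (occI S c) [] 0, List.nil_append]
  have hfo := full_occ S c hc hP S.length 0 (by omega)
  rw [show ((0 : Nat) : Int) = (0 : Int) from rfl] at hfo
  unfold occFrom at hfo
  unfold occI
  simp only [Nat.sub_zero, Nat.zero_add, List.range_eq_range'] at hfo ⊢
  exact hfo

-- ===== VERDICT (by name: the statement is the Claim_ definition above) =====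
theorem get_nxlist_spec : Claim_equal_get_nxlist := by
  unfold Claim_equal_get_nxlist
  intro S _ hPre
  unfold Spec_get_nxlist
  rw [A_eq S hPre, B_eq S hPre]
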